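-- pv_equiv track=rewrite | github.com/collinsakenga/codewars_solutions | 6 kyu/Prime reduction.py | solve
-- ===== SOURCE A (Python) =====
-- def solve(a,b):
--     total=0
--     for i in range(max(2, a), b):
--         if not is_prime(i):
--             continue
--         temp=[i]
--         temp2=set()
--         temp2.add(temp[-1])
--         while True:
--             temp.append(square_sum(temp[-1]))
--             temp2.add(temp[-1])
--             if temp[-1]==1:
--                 total+=1
--                 break
--             elif len(temp)!=len(temp2):
--                 break
--     return total
--
-- def is_prime(n):
--     if n>2 and n%2==0:
--         return False
--     elif n>3 and n%3==0:
--         return False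
--     for i in range(2, int(n**0.5)+1):
--         if n%i==0:
--             return False
--     return True
--
-- def square_sum(n):
--     total=0
--     for i in str(n):
--         total+=int(i)**2
--     return total
-- ===== SOURCE B (Python) =====
-- def square_sum(n):
--     s = 0
--     while n:
--         s += (n % 10) ** 2
--         n //= 10
--     return s
--
-- def _build_happy():
--     # happy[m] for m in 1..810: iterate square_sum until the orbit hits 1 or the 4-cycle
--     happy = [False] * 811
--     for m in range(1, 811):
--         x = m
--         while x != 1 and x != 4:
--             x = square_sum(x)
--         happy[m] = x == 1
--     return happy
--
-- _HAPPY = _build_happy()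
--
-- def is_prime_b(n):
--     if n < 2:
--         return False
--     if n % 2 == 0:
--         return n == 2
--     return all(n % d for d in range(3, int(n ** 0.5) + 1, 2))
--
-- def solve(a, b):
--     count = 0
--     for i in range(max(2, a), b):
--         if _HAPPY[square_sum(i)] and is_prime_b(i):
--             count += 1
--     return count
-- ===== Notes on version B (the rewrite author's own statement) =====
-- stated objective: faster
-- what changed: A re-runs a list+set cycle-detection happy check from scratch for every prime candidate and trial-divides by every integer up to sqrt(n); B precomputes one happy table for the whole range (one square_sum step maps any candidate into 1..810), reads happiness as a single table lookup done before the primality test, and trial-divides by odd numbers only.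
import Mathlib
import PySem

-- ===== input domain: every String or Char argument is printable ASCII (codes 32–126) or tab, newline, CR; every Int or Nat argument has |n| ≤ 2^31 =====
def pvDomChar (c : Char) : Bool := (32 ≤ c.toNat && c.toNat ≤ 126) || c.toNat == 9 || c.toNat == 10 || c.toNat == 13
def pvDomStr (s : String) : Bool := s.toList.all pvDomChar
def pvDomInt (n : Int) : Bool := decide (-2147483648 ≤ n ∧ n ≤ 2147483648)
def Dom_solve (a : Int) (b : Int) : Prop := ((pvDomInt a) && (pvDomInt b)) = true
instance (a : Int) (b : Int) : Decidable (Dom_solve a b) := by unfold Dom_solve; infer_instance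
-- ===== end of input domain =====

-- B replaces A's per-candidate cycle-detection happy test by one precomputed happy table plus an
-- odd-only trial division, tried in the cheap-test-first order (objective: faster, constant factor).

-- ===== PORT A =====

-- port of int(n**0.5): exact for 0 ≤ n ≤ 2^31 (IEEE double sqrt is correctly rounded there)
def pvIsqrt (n : Int) : Int := (n.toNat.sqrt : Int)

-- square_sum(n): for i in str(n): total += int(i)**2  (int() never raises here: str of the
-- nonnegative arguments it is applied to consists of digits; getD 0 is that dead branch)
def sqSumA (n : Int) : Int :=
  (PySem.Int.toChars n).foldl (fun total c => total + ((PySem.Int.ofChars? [c]).getD 0) ^ 2) 0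

def isPrimeA (n : Int) : Bool :=
  if n > 2 ∧ PySem.Int.mod n 2 = 0 then false
  else if n > 3 ∧ PySem.Int.mod n 3 = 0 then false
  else if (PySem.List.pyRange 2 (pvIsqrt n + 1) 1).any (fun i => decide (PySem.Int.mod n i = 0))
    then false else true

-- the 'while True' body; the fuel only makes it total (the loop stops once a value repeats or hits 1)
def loopA : Nat → List Int → PySem.Set Int → Int
  | 0, _, _ => 0
  | fuel + 1, temp, temp2 =>
    let v := sqSumA (PySem.List.pyGetD temp (-1) 0)
    let temp' := temp ++ [v]
    let temp2' := PySem.Set.add temp2 v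
    if v = 1 then 1
    else if (temp'.length : Int) ≠ PySem.Set.len temp2' then 0
    else loopA fuel temp' temp2'

def solve (a : Int) (b : Int) : Int :=
  (PySem.List.pyRange (max 2 a) b 1).foldl
    (fun total i =>
      if ¬ isPrimeA i then total
      else total + loopA 2000 [i] (PySem.Set.add PySem.Set.empty i))
    0

-- ===== PORT B =====

-- square_sum(n): digit peeling by divmod; exact for the n ≥ 0 it is applied to
-- (the fuel n.toNat + 1 bounds the number of halving steps, as Nat.toDigits does)
def sqSumBAux : Nat → Nat → Int → Int
  | 0, _, s => s
  | fuel + 1, m, s => if m = 0 then s else sqSumBAux fuel (m / 10) (s + ((m % 10 : Nat) : Int) ^ 2)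

def sqSumB (n : Int) : Int := sqSumBAux (n.toNat + 1) n.toNat 0

-- 'while x != 1 and x != 4'; the fuel only makes it total
def reachB : Nat → Int → Int
  | 0, x => x
  | fuel + 1, x => if x ≠ 1 ∧ x ≠ 4 then reachB fuel (sqSumB x) else x

-- happy = [False]*811, then filled for m in range(1, 811)
def happyTbl : List Bool :=
  (List.range 811).map (fun m : Nat => if m = 0 then false else decide (reachB 2000 (m : Int) = 1))

def isPrimeB (n : Int) : Bool :=
  if n < 2 then false
  else if PySem.Int.mod n 2 = 0 then decide (n = 2)
  else (PySem.List.pyRange 3 (pvIsqrt n + 1) 2).all (fun d => decide (PySem.Int.mod n d ≠ 0))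

def solve_alt (a : Int) (b : Int) : Int :=
  (PySem.List.pyRange (max 2 a) b 1).foldl
    (fun count i =>
      if PySem.List.pyGetD happyTbl (sqSumB i) false && isPrimeB i then count + 1 else count)
    0

-- ===== PRECONDITION & SPEC =====
def Spec_solve (a : Int) (b : Int) (out : Int) : Prop := out = solve_alt a b
instance (a : Int) (b : Int) (out : Int) : Decidable (Spec_solve a b out) := by unfold Spec_solve; infer_instance

-- ===== CLAIM (what is proved, stated in full; the proofs are below) =====
def Claim_equal_solve : Prop := ∀ (a : Int) (b : Int), Dom_solve a b → Spec_solve a b (solve a b)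

-- ===== LEMMAS AND PROOFS =====

-- sum of squares of decimal digits: the common value of both square_sum ports
def dsum (n : Nat) : Int := (List.map (fun d : Nat => (d : Int) ^ 2) (Nat.digits 10 n)).sum

lemma toDigitsCore_eq : ∀ (f n : Nat) (l : List Char), n < f →
    Nat.toDigitsCore 10 f n l =
      (if n = 0 then ['0'] else ((Nat.digits 10 n).map Nat.digitChar).reverse) ++ l := by
  intro f
  induction f with
  | zero => omega
  | succ f ih =>
    intro n l hn
    show (if n / 10 = 0 then Nat.digitChar (n % 10) :: l
          else Nat.toDigitsCore 10 f (n / 10) (Nat.digitChar (n % 10) :: l)) = _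
    by_cases h0 : n = 0
    · subst h0
      norm_num
      rfl
    by_cases hsmall : n / 10 = 0
    · have hlt : n < 10 := by omega
      rw [if_pos hsmall, if_neg h0, Nat.digits_of_lt 10 n h0 hlt]
      simp [Nat.mod_eq_of_lt hlt]
    · have hrec : n / 10 < f := by
        have := Nat.div_lt_self (Nat.pos_of_ne_zero h0) (by norm_num : (1:Nat) < 10)
        omega
      have hd10 : Nat.digits 10 n = n % 10 :: Nat.digits 10 (n / 10) :=
        Nat.digits_def' (by norm_num) (Nat.pos_of_ne_zero h0)
      rw [if_neg hsmall, ih (n / 10) _ hrec, if_neg hsmall, if_neg h0, hd10]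
      simp

lemma toChars_nat (n : Nat) :
    PySem.Int.toChars (n : Int) =
      (if n = 0 then ['0'] else ((Nat.digits 10 n).map Nat.digitChar).reverse) := by
  have h1 : ¬ ((n : Int) < 0) := by omega
  have h2 : ((n : Int)).toNat = n := rfl
  simp only [PySem.Int.toChars, if_neg h1, h2, Nat.toDigits]
  rw [toDigitsCore_eq (n + 1) n [] (by omega), List.append_nil]

lemma charval_digit (d : Nat) (hd : d < 10) :
    (PySem.Int.ofChars? [Nat.digitChar d]).getD 0 = (d : Int) := by
  interval_cases d <;> decide

lemma sqSumA_nat (n : Nat) : sqSumA (n : Int) = dsum n := by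
  unfold sqSumA
  rw [toChars_nat]
  by_cases h0 : n = 0
  · subst h0; decide
  · rw [if_neg h0, PySem.List.foldl_add]
    rw [List.map_reverse, List.sum_reverse, List.map_map]
    have hmap : List.map ((fun c => ((PySem.Int.ofChars? [c]).getD 0) ^ 2) ∘ Nat.digitChar)
        (Nat.digits 10 n) = List.map (fun d : Nat => (d : Int) ^ 2) (Nat.digits 10 n) := by
      apply List.map_congr_left
      intro d hd
      have : d < 10 := Nat.digits_lt_base (by norm_num) hd
      simp [Function.comp, charval_digit d this]
    rw [hmap, zero_add, dsum]

lemma sqSumBAux_eq : ∀ (fuel m : Nat) (s : Int), m < fuel → sqSumBAux fuel m s = s + dsum m := by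
  intro fuel
  induction fuel with
  | zero => omega
  | succ f ih =>
    intro m s hm
    show (if m = 0 then s else sqSumBAux f (m / 10) (s + ((m % 10 : Nat) : Int) ^ 2)) = _
    by_cases h0 : m = 0
    · subst h0; simp [dsum]
    · have hrec : m / 10 < f := by
        have := Nat.div_lt_self (Nat.pos_of_ne_zero h0) (by norm_num : (1:Nat) < 10)
        omega
      have hd10 : Nat.digits 10 m = m % 10 :: Nat.digits 10 (m / 10) :=
        Nat.digits_def' (by norm_num) (Nat.pos_of_ne_zero h0)
      rw [if_neg h0, ih (m / 10) _ hrec]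
      unfold dsum
      rw [hd10]
      simp [add_assoc]

lemma sqSumB_nat (n : Nat) : sqSumB (n : Int) = dsum n := by
  unfold sqSumB
  have h2 : ((n : Int)).toNat = n := rfl
  rw [h2, sqSumBAux_eq (n + 1) n 0 (by omega), zero_add]

lemma sqA_eq_sqB (x : Int) (h : 0 ≤ x) : sqSumA x = sqSumB x := by
  have hx : x = ((x.toNat : Nat) : Int) := (Int.toNat_of_nonneg h).symm
  rw [hx, sqSumA_nat, sqSumB_nat]

lemma dsum_nonneg (n : Nat) : 0 ≤ dsum n := by
  apply List.sum_nonneg; intro x hx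
  simp only [List.mem_map] at hx
  obtain ⟨d, _, rfl⟩ := hx; positivity

lemma dsum_le (n : Nat) (h : n < 10 ^ 10) : dsum n ≤ 810 := by
  have hlen : (Nat.digits 10 n).length ≤ 10 :=
    (Nat.digits_length_le_iff (by norm_num) n).mpr h
  have hbd : ∀ x ∈ List.map (fun d : Nat => (d : Int) ^ 2) (Nat.digits 10 n), x ≤ 81 := by
    intro x hx
    simp only [List.mem_map] at hx
    obtain ⟨d, hd, rfl⟩ := hx
    have h9 : d < 10 := Nat.digits_lt_base (by norm_num) hd
    have : (d : Int) ≤ 9 := by exact_mod_cast Nat.lt_succ_iff.mp h9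
    nlinarith [Int.natCast_nonneg d]
  have hs := List.sum_le_card_nsmul _ (81 : Int) hbd
  rw [List.length_map, nsmul_eq_mul] at hs
  have hc : ((Nat.digits 10 n).length : Int) ≤ 10 := by exact_mod_cast hlen
  unfold dsum
  nlinarith

lemma dsum_pos (n : Nat) (h : 1 ≤ n) : 1 ≤ dsum n := by
  have hne : Nat.digits 10 n ≠ [] := Nat.digits_ne_nil_iff_ne_zero.mpr (by omega)
  have hlast := Nat.getLast_digit_ne_zero 10 (show n ≠ 0 by omega)
  set g := (Nat.digits 10 n).getLast (Nat.digits_ne_nil_iff_ne_zero.mpr (by omega)) with hg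
  have hmem : g ∈ Nat.digits 10 n := List.getLast_mem _
  have hmem2 : (g : Int) ^ 2 ∈ List.map (fun d : Nat => (d : Int) ^ 2) (Nat.digits 10 n) :=
    List.mem_map_of_mem hmem
  have hnn : ∀ x ∈ List.map (fun d : Nat => (d : Int) ^ 2) (Nat.digits 10 n), 0 ≤ x := by
    intro x hx
    simp only [List.mem_map] at hx
    obtain ⟨d, _, rfl⟩ := hx; positivity
  have hle := List.single_le_sum hnn _ hmem2
  have hg1 : 1 ≤ (g : Int) := by exact_mod_cast Nat.one_le_iff_ne_zero.mpr hlast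
  have hsq : (1 : Int) ≤ (g : Int) ^ 2 := by nlinarith
  unfold dsum
  omega

lemma sqSumB_bounds (x : Int) (h0 : 0 ≤ x) (h1 : x ≤ 2 ^ 31) :
    0 ≤ sqSumB x ∧ sqSumB x ≤ 810 := by
  have hx : x = ((x.toNat : Nat) : Int) := (Int.toNat_of_nonneg h0).symm
  rw [hx, sqSumB_nat]
  exact ⟨dsum_nonneg _, dsum_le _ (by omega)⟩

lemma sqSumB_nonneg (x : Int) : 0 ≤ sqSumB x := by
  by_cases h : 0 ≤ x
  · have hx : x = ((x.toNat : Nat) : Int) := (Int.toNat_of_nonneg h).symm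
    rw [hx, sqSumB_nat]; exact dsum_nonneg _
  · have hz : x.toNat = 0 := by omega
    unfold sqSumB
    rw [hz]; decide

lemma sqSumB_pos (x : Int) (h : 1 ≤ x) : 1 ≤ sqSumB x := by
  have hx : x = ((x.toNat : Nat) : Int) := (Int.toNat_of_nonneg (by omega)).symm
  rw [hx, sqSumB_nat]
  exact dsum_pos _ (by omega)

-- A's inner loop with the list/set bookkeeping stripped to its membership content
def runA : Nat → List Int → Int → Int
  | 0, _, _ => 0
  | fuel + 1, seen, x =>
    let v := sqSumB x
    if v = 1 then 1
    else if v ∈ seen then 0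
    else runA fuel (seen ++ [v]) v

lemma loopA_eq_runA : ∀ (fuel : Nat) (temp : List Int) (h : temp ≠ []),
    0 ≤ temp.getLast h → loopA fuel temp temp = runA fuel temp (temp.getLast h) := by
  intro fuel
  induction fuel with
  | zero => intro temp h _; rfl
  | succ fuel ih =>
    intro temp h hpos
    simp only [loopA, runA, PySem.List.pyGetD_neg_one temp 0 h, sqA_eq_sqB _ hpos]
    set v := sqSumB (temp.getLast h) with hv
    by_cases hv1 : v = 1
    · simp [hv1]
    rw [if_neg hv1, if_neg hv1]
    by_cases hmem : v ∈ temp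
    · have hcont : temp.contains v = true := List.contains_iff_mem.mpr hmem
      simp only [PySem.Set.add, PySem.Set.contains, hcont, if_true, if_pos hmem]
      rw [if_pos]
      simp only [PySem.Set.len, List.length_append, List.length_singleton]
      push_cast
      omega
    · have hcont : temp.contains v = false := by
        rw [← Bool.not_eq_true, List.contains_iff_mem]; exact hmem
      simp only [PySem.Set.add, PySem.Set.contains, hcont, Bool.false_eq_true, if_false,
        if_neg hmem]
      rw [if_neg]
      · have hne : temp ++ [v] ≠ [] := by simp
        have hlast : (temp ++ [v]).getLast hne = v := List.getLast_concat
        have hstep := ih (temp ++ [v]) hne (by rw [hlast]; exact sqSumB_nonneg _)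
        rw [hlast] at hstep
        exact hstep
      · simp only [PySem.Set.len, List.length_append, List.length_singleton]
        push_cast
        omega

lemma runA_vals : ∀ (fuel : Nat) (s : List Int) (x : Int),
    runA fuel s x = 0 ∨ runA fuel s x = 1 := by
  intro fuel
  induction fuel with
  | zero => intro s x; left; rfl
  | succ fuel ih =>
    intro s x
    simp only [runA]
    split_ifs
    · right; rfl
    · left; rfl
    · exact ih _ _

-- orbit machinery: reach1 x says the square_sum orbit of x reaches 1
def reach1 (x : Int) : Prop := ∃ k : Nat, sqSumB^[k] x = 1

-- the orbit prefix list [x, f x, ..., f^(n-1) x]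
def orbitL (n : Nat) (x : Int) : List Int := (List.range n).map (fun k => sqSumB^[k] x)

lemma orbitL_succ (n : Nat) (x : Int) : orbitL (n + 1) x = orbitL n x ++ [sqSumB^[n] x] := by
  unfold orbitL
  rw [List.range_succ, List.map_append]
  rfl

lemma it_bounds (x : Int) (h0 : 0 ≤ x) (h1 : x ≤ 2 ^ 31) :
    ∀ k : Nat, 1 ≤ k → 0 ≤ sqSumB^[k] x ∧ sqSumB^[k] x ≤ 810 := by
  intro k hk
  induction k with
  | zero => omega
  | succ k ih =>
    rcases Nat.eq_or_lt_of_le hk with hke | hke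
    · have hk0 : k = 0 := by omega
      subst hk0
      simpa using sqSumB_bounds x h0 h1
    · have hk1 : 1 ≤ k := by omega
      obtain ⟨ha, hb⟩ := ih hk1
      rw [Function.iterate_succ_apply']
      exact sqSumB_bounds _ ha (by omega)

lemma card_bound (x : Int) (h0 : 0 ≤ x) (h1 : x ≤ 2 ^ 31) (n : Nat)
    (hinj : ∀ a b : Nat, a < n → b < n → sqSumB^[a] x = sqSumB^[b] x → a = b) : n ≤ 812 := by
  have hmaps : ∀ j ∈ Finset.range n, sqSumB^[j] x ∈ insert x (Finset.Icc (0:Int) 810) := by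
    intro j hj
    rcases Nat.eq_zero_or_pos j with hj0 | hj0
    · subst hj0; simp
    · obtain ⟨ha, hb⟩ := it_bounds x h0 h1 j hj0
      simp only [Finset.mem_insert, Finset.mem_Icc]
      right; exact ⟨ha, hb⟩
  have hinj' : Set.InjOn (fun j => sqSumB^[j] x) (Finset.range n) := by
    intro a ha b hb hab
    simp only [Finset.coe_range, Set.mem_Iio] at ha hb
    exact hinj a b ha hb hab
  have hcl := Finset.card_le_card_of_injOn _ hmaps hinj'
  have hcard : (insert x (Finset.Icc (0:Int) 810)).card ≤ 812 := by
    have h811 : (Finset.Icc (0:Int) 810).card = 811 := by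
      rw [Int.card_Icc]; rfl
    have := Finset.card_insert_le x (Finset.Icc (0:Int) 810)
    omega
  simp only [Finset.card_range] at hcl
  omega

lemma cycle_mem (x : Int) (a b : Nat) (hab : a < b) (heq : sqSumB^[b] x = sqSumB^[a] x) :
    ∀ t : Nat, a ≤ t → ∃ s : Nat, a ≤ s ∧ s < b ∧ sqSumB^[t] x = sqSumB^[s] x := by
  intro t ht
  induction t with
  | zero => exact ⟨0, by omega, by omega, rfl⟩
  | succ t ih =>
    rcases Nat.eq_or_lt_of_le ht with hte | hte
    · exact ⟨t + 1, by omega, by omega, rfl⟩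
    · obtain ⟨s, hs1, hs2, hts⟩ := ih (by omega)
      rcases Nat.eq_or_lt_of_le (Nat.succ_le_of_lt hs2) with hsb | hsb
      · refine ⟨a, le_refl a, hab, ?_⟩
        rw [Function.iterate_succ_apply', hts, ← Function.iterate_succ_apply' sqSumB s x, hsb,
          heq]
      · refine ⟨s + 1, by omega, hsb, ?_⟩
        rw [Function.iterate_succ_apply', hts, ← Function.iterate_succ_apply' sqSumB s x]

lemma no_reach1_of_cycle (x : Int) (a b : Nat) (hab : a < b)
    (heq : sqSumB^[b] x = sqSumB^[a] x)
    (h1 : ∀ s : Nat, s < b → sqSumB^[s] x ≠ 1) : ¬ reach1 x := by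
  rintro ⟨K, hK⟩
  rcases lt_or_ge K b with hKb | hKb
  · exact h1 K hKb hK
  · obtain ⟨s, _, hs2, hts⟩ := cycle_mem x a b hab heq K (by omega)
    exact h1 s hs2 (hts ▸ hK)

lemma master_A : ∀ (fuel m : Nat) (i : Int), 2 ≤ i → i ≤ 2 ^ 31 →
    (∀ a b : Nat, a ≤ m → b ≤ m → sqSumB^[a] i = sqSumB^[b] i → a = b) →
    (∀ j : Nat, j ≤ m → sqSumB^[j] i ≠ 1) →
    813 ≤ fuel + (m + 1) →
    (runA fuel (orbitL (m + 1) i) (sqSumB^[m] i) = 1 ↔ reach1 i) := by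
  intro fuel
  induction fuel with
  | zero =>
    intro m i hi2 hi31 hinj _ hfuel
    exfalso
    have : m + 1 ≤ 812 :=
      card_bound i (by omega) hi31 (m + 1) (fun a b ha hb => hinj a b (by omega) (by omega))
    omega
  | succ fuel ih =>
    intro m i hi2 hi31 hinj h1 hfuel
    have hit : sqSumB (sqSumB^[m] i) = sqSumB^[m + 1] i :=
      (Function.iterate_succ_apply' sqSumB m i).symm
    simp only [runA, hit]
    set v := sqSumB^[m + 1] i with hv
    by_cases hv1 : v = 1
    · rw [if_pos hv1]
      constructor
      · intro _; exact ⟨m + 1, hv1⟩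
      · intro _; rfl
    rw [if_neg hv1]
    by_cases hmem : v ∈ orbitL (m + 1) i
    · rw [if_pos hmem]
      simp only [orbitL, List.mem_map, List.mem_range] at hmem
      obtain ⟨j, hj, hjv⟩ := hmem
      have hnr : ¬ reach1 i := by
        apply no_reach1_of_cycle i j (m + 1) hj (by rw [← hv, hjv])
        intro s hs; exact h1 s (by omega)
      constructor
      · intro hcon; exact absurd hcon (by norm_num)
      · intro hcon; exact absurd hcon hnr
    · rw [if_neg hmem]
      have horb : orbitL (m + 1) i ++ [v] = orbitL (m + 2) i := by
        rw [hv, show m + 2 = (m + 1) + 1 from rfl]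
        exact (orbitL_succ (m + 1) i).symm
      rw [horb]
      apply ih (m + 1) i hi2 hi31
      · intro a b ha hb hab
        rcases Nat.lt_or_ge a (m + 1) with ha' | ha' <;> rcases Nat.lt_or_ge b (m + 1) with hb' | hb'
        · exact hinj a b (by omega) (by omega) hab
        · exfalso
          have hbm : b = m + 1 := by omega
          subst hbm
          exact hmem (by
            simp only [orbitL, List.mem_map, List.mem_range]
            exact ⟨a, ha', by rw [hab, ← hv]⟩)
        · exfalso
          have ham : a = m + 1 := by omega
          subst ham
          exact hmem (by
            simp only [orbitL, List.mem_map, List.mem_range]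
            exact ⟨b, hb', by rw [← hab, ← hv]⟩)
        · omega
      · intro j hj
        rcases Nat.lt_or_ge j (m + 1) with hj' | hj'
        · exact h1 j (by omega)
        · have hjm : j = m + 1 := by omega
          subst hjm; exact hv1
      · omega

-- the 4-cycle of the digit-square-sum map
def C8 : List Int := [4, 16, 37, 58, 89, 145, 42, 20]

lemma C8_closed : ∀ y ∈ C8, sqSumB y ∈ C8 := by decide

lemma orbit4_in_C8 : ∀ t : Nat, sqSumB^[t] 4 ∈ C8 := by
  intro t
  induction t with
  | zero => decide
  | succ t ih =>
    rw [Function.iterate_succ_apply']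
    exact C8_closed _ ih

lemma not_reach1_four : ¬ reach1 4 := by
  rintro ⟨K, hK⟩
  have hmem := orbit4_in_C8 K
  rw [hK] at hmem
  exact absurd hmem (by decide)

lemma reach1_of_reachB : ∀ (fuel : Nat) (x : Int), reachB fuel x = 1 → reach1 x := by
  intro fuel
  induction fuel with
  | zero => intro x h; exact ⟨0, h⟩
  | succ fuel ih =>
    intro x h
    by_cases hc : x ≠ 1 ∧ x ≠ 4
    · rw [show reachB (fuel + 1) x = reachB fuel (sqSumB x) by simp [reachB, hc]] at h
      obtain ⟨k, hk⟩ := ih _ h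
      exact ⟨k + 1, by rw [Function.iterate_succ_apply]; exact hk⟩
    · rw [show reachB (fuel + 1) x = x by simp [reachB, hc]] at h
      exact ⟨0, h⟩

lemma reachB_of_path : ∀ (K fuel : Nat) (x : Int), sqSumB^[K] x = 1 →
    (∀ j : Nat, j < K → sqSumB^[j] x ≠ 1) → K ≤ fuel → reachB fuel x = 1 := by
  intro K
  induction K with
  | zero =>
    intro fuel x hK _ _
    simp only [Function.iterate_zero_apply] at hK
    subst hK
    cases fuel with
    | zero => rfl
    | succ fuel => simp [reachB]
  | succ K ih =>
    intro fuel x hK hmin hf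
    have hx1 : x ≠ 1 := by simpa using hmin 0 (by omega)
    have hx4 : x ≠ 4 := by
      rintro rfl
      exact not_reach1_four ⟨K + 1, hK⟩
    obtain ⟨f, rfl⟩ : ∃ f, fuel = f + 1 := ⟨fuel - 1, by omega⟩
    rw [show reachB (f + 1) x = reachB f (sqSumB x) by simp [reachB, hx1, hx4]]
    apply ih f (sqSumB x)
    · rw [← Function.iterate_succ_apply sqSumB K x]; exact hK
    · intro j hj
      have hj1 := hmin (j + 1) (by omega)
      rw [Function.iterate_succ_apply] at hj1
      exact hj1
    · omega

lemma reachB_eq_one (x : Int) (h0 : 0 ≤ x) (h31 : x ≤ 2 ^ 31) (hr : reach1 x) :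
    reachB 2000 x = 1 := by
  obtain ⟨K0, hK0⟩ := hr
  have hex : ∃ k, sqSumB^[k] x = 1 := ⟨K0, hK0⟩
  have hK : sqSumB^[Nat.find hex] x = 1 := Nat.find_spec hex
  have hmin : ∀ j, j < Nat.find hex → sqSumB^[j] x ≠ 1 := fun j hj => Nat.find_min hex hj
  set K := Nat.find hex
  have hinj : ∀ a b : Nat, a < K + 1 → b < K + 1 → sqSumB^[a] x = sqSumB^[b] x → a = b := by
    intro a b ha hb hab
    rcases lt_trichotomy a b with hlt | heq | hlt
    · exfalso
      obtain ⟨s, _, hs2, hts⟩ := cycle_mem x a b hlt hab.symm K (by omega)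
      exact hmin s (by omega) (hts ▸ hK)
    · exact heq
    · exfalso
      obtain ⟨s, _, hs2, hts⟩ := cycle_mem x b a hlt hab K (by omega)
      exact hmin s (by omega) (hts ▸ hK)
  have hKle : K + 1 ≤ 812 := card_bound x h0 h31 (K + 1) hinj
  exact reachB_of_path K 2000 x hK hmin (by omega)

lemma reach1_step (x : Int) (hx : x ≠ 1) : reach1 x ↔ reach1 (sqSumB x) := by
  constructor
  · rintro ⟨K, hK⟩
    cases K with
    | zero => exact absurd hK hx
    | succ K =>
      rw [Function.iterate_succ_apply] at hK
      exact ⟨K, hK⟩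
  · rintro ⟨k, hk⟩
    exact ⟨k + 1, by rw [Function.iterate_succ_apply]; exact hk⟩

lemma lookup_happy (v : Int) (h1 : 1 ≤ v) (h2 : v ≤ 810) :
    PySem.List.pyGetD happyTbl v false = decide (reachB 2000 v = 1) := by
  have h0 : (0 : Int) ≤ v := by omega
  have hlen : v < (happyTbl.length : Int) := by
    simp only [happyTbl, List.length_map, List.length_range]
    omega
  rw [PySem.List.pyGetD_eq_getElem happyTbl false h0 hlen]
  simp only [happyTbl, List.getElem_map, List.getElem_range]
  rw [if_neg (by omega)]
  rw [Int.toNat_of_nonneg h0]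

lemma contribution_A (i : Int) (h2 : 2 ≤ i) (h31 : i ≤ 2 ^ 31) :
    loopA 2000 [i] (PySem.Set.add PySem.Set.empty i) =
      (if PySem.List.pyGetD happyTbl (sqSumB i) false then 1 else 0) := by
  have hset : PySem.Set.add PySem.Set.empty i = [i] := by
    simp [PySem.Set.add, PySem.Set.empty, PySem.Set.contains]
  rw [hset]
  have hne : ([i] : List Int) ≠ [] := by simp
  have hlast : ([i] : List Int).getLast hne = i := rfl
  have hbridge := loopA_eq_runA 2000 [i] hne (by rw [hlast]; omega)
  rw [hlast] at hbridge
  rw [hbridge]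
  have horb : orbitL 1 i = [i] := by
    simp [orbitL, List.range_succ]
  have hiter : sqSumB^[0] i = i := rfl
  have hiff : runA 2000 [i] i = 1 ↔ reach1 i := by
    have hm := master_A 2000 0 i h2 h31
      (by intro a b ha hb _; omega)
      (by intro j hj
          have hj0 : j = 0 := by omega
          subst hj0
          rw [hiter]
          omega)
      (by omega)
    rw [horb, hiter] at hm
    exact hm
  have hv1 : 1 ≤ sqSumB i := sqSumB_pos i (by omega)
  have hv810 : sqSumB i ≤ 810 := (sqSumB_bounds i (by omega) h31).2
  rw [lookup_happy (sqSumB i) hv1 hv810]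
  have hstep : reach1 i ↔ reach1 (sqSumB i) := reach1_step i (by omega)
  by_cases hr : reach1 i
  · rw [hiff.mpr hr]
    rw [if_pos (by
      simp only [decide_eq_true_eq]
      exact reachB_eq_one _ (by omega) (by omega) (hstep.mp hr))]
  · have hz : runA 2000 [i] i = 0 := by
      rcases runA_vals 2000 [i] i with hz | hz
      · exact hz
      · exact absurd (hiff.mp hz) hr
    rw [hz]
    rw [if_neg (by
      simp only [decide_eq_true_eq]
      intro hcon
      exact hr (hstep.mpr (reach1_of_reachB 2000 _ hcon)))]

-- primality: both tests decide "there is no divisor d with 2 ≤ d and d*d ≤ n"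
def SD (n : Int) : Prop := ∃ d : Int, 2 ≤ d ∧ d * d ≤ n ∧ d ∣ n

lemma isqrt_le_iff (n d : Int) (hn : 0 ≤ n) (hd : 0 ≤ d) : d ≤ pvIsqrt n ↔ d * d ≤ n := by
  unfold pvIsqrt
  have hdn : (d.toNat : Int) = d := Int.toNat_of_nonneg hd
  have hnn : (n.toNat : Int) = n := Int.toNat_of_nonneg hn
  constructor
  · intro hle
    have hd' : d.toNat ≤ n.toNat.sqrt := by omega
    have hsq := Nat.le_sqrt.mp hd'
    have hsq' : ((d.toNat * d.toNat : Nat) : Int) ≤ ((n.toNat : Nat) : Int) := by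
      exact_mod_cast hsq
    push_cast at hsq'
    rw [hdn, hnn] at hsq'
    exact hsq'
  · intro hle
    have hdd : d.toNat * d.toNat ≤ n.toNat := by
      have hc : ((d.toNat * d.toNat : Nat) : Int) ≤ ((n.toNat : Nat) : Int) := by
        push_cast
        rw [hdn, hnn]
        exact hle
      exact_mod_cast hc
    have := Nat.le_sqrt.mpr hdd
    omega

lemma primeA_iff (n : Int) (h2 : 2 ≤ n) : isPrimeA n = true ↔ ¬ SD n := by
  unfold isPrimeA
  by_cases hA : n > 2 ∧ PySem.Int.mod n 2 = 0
  · rw [if_pos hA]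
    have hdvd : (2 : Int) ∣ n := (PySem.Int.mod_eq_zero_iff_dvd n 2).mp hA.2
    have hSD : SD n := by
      refine ⟨2, by omega, ?_, hdvd⟩
      obtain ⟨k, rfl⟩ := hdvd; omega
    simp [hSD]
  rw [if_neg hA]
  by_cases hB : n > 3 ∧ PySem.Int.mod n 3 = 0
  · rw [if_pos hB]
    have hdvd : (3 : Int) ∣ n := (PySem.Int.mod_eq_zero_iff_dvd n 3).mp hB.2
    have hodd : ¬ (2 : Int) ∣ n := by
      intro hc
      exact hA ⟨by omega, (PySem.Int.mod_eq_zero_iff_dvd n 2).mpr hc⟩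
    have hSD : SD n := by
      refine ⟨3, by omega, ?_, hdvd⟩
      obtain ⟨k, rfl⟩ := hdvd
      omega
    simp [hSD]
  rw [if_neg hB]
  cases han : (PySem.List.pyRange 2 (pvIsqrt n + 1) 1).any
      (fun i => decide (PySem.Int.mod n i = 0))
  · rw [if_neg (by simp)]
    rw [List.any_eq_false] at han
    simp only [true_iff]
    rintro ⟨d, hd2, hdd, hdvd⟩
    have hmem : d ∈ PySem.List.pyRange 2 (pvIsqrt n + 1) 1 := by
      rw [PySem.List.mem_pyRange_one]
      have := (isqrt_le_iff n d (by omega) (by omega)).mpr hdd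
      omega
    have := han d hmem
    simp only [decide_eq_true_eq] at this
    exact this ((PySem.Int.mod_eq_zero_iff_dvd n d).mpr hdvd)
  · rw [if_pos rfl]
    rw [List.any_eq_true] at han
    obtain ⟨d, hmem, hdec⟩ := han
    rw [PySem.List.mem_pyRange_one] at hmem
    simp only [decide_eq_true_eq] at hdec
    have hSD : SD n := by
      refine ⟨d, hmem.1, ?_, (PySem.Int.mod_eq_zero_iff_dvd n d).mp hdec⟩
      exact (isqrt_le_iff n d (by omega) (by omega)).mp (by omega)
    simp [hSD]

lemma primeB_iff (n : Int) (h2 : 2 ≤ n) : isPrimeB n = true ↔ ¬ SD n := by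
  unfold isPrimeB
  rw [if_neg (by omega : ¬ n < 2)]
  by_cases heven : PySem.Int.mod n 2 = 0
  · rw [if_pos heven]
    have hdvd : (2 : Int) ∣ n := (PySem.Int.mod_eq_zero_iff_dvd n 2).mp heven
    by_cases hn2 : n = 2
    · subst hn2
      have hns : ¬ SD 2 := by
        rintro ⟨d, hd2, hdd, _⟩
        nlinarith
      simp [hns]
    · have hSD : SD n := by
        refine ⟨2, by omega, ?_, hdvd⟩
        obtain ⟨k, rfl⟩ := hdvd; omega
      simp [hSD, hn2]
  · rw [if_neg heven]
    have hodd : ¬ (2 : Int) ∣ n := fun hc =>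
      heven ((PySem.Int.mod_eq_zero_iff_dvd n 2).mpr hc)
    rw [List.all_eq_true]
    constructor
    · intro hall
      rintro ⟨d, hd2, hdd, hdvd⟩
      have hdodd : ¬ (2 : Int) ∣ d := fun hc => hodd (hc.trans hdvd)
      have hmem : d ∈ PySem.List.pyRange 3 (pvIsqrt n + 1) 2 := by
        rw [PySem.List.mem_pyRange_iff_of_pos (by omega)]
        have := (isqrt_le_iff n d (by omega) (by omega)).mpr hdd
        refine ⟨by omega, by omega, by omega⟩
      have := hall d hmem
      simp only [decide_eq_true_eq] at this
      exact this ((PySem.Int.mod_eq_zero_iff_dvd n d).mpr hdvd)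
    · intro hns d hmem
      simp only [decide_eq_true_eq]
      intro hc
      rw [PySem.List.mem_pyRange_iff_of_pos (by omega)] at hmem
      exact hns ⟨d, by omega, (isqrt_le_iff n d (by omega) (by omega)).mp (by omega),
        (PySem.Int.mod_eq_zero_iff_dvd n d).mp hc⟩

lemma prime_eq (n : Int) (h2 : 2 ≤ n) : isPrimeA n = isPrimeB n := by
  have hAiff := primeA_iff n h2
  have hBiff := primeB_iff n h2
  cases hA : isPrimeA n <;> cases hB : isPrimeB n
  · rfl
  · rw [hA] at hAiff
    rw [hB] at hBiff
    exact absurd (hBiff.mp rfl) (by simpa using hAiff)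
  · rw [hA] at hAiff
    rw [hB] at hBiff
    exact absurd (hAiff.mp rfl) (by simpa using hBiff)
  · rfl

lemma per_elem (i : Int) (h2 : 2 ≤ i) (hb : i ≤ 2 ^ 31) (t : Int) :
    (if ¬ isPrimeA i then t
     else t + loopA 2000 [i] (PySem.Set.add PySem.Set.empty i)) =
    (if PySem.List.pyGetD happyTbl (sqSumB i) false && isPrimeB i then t + 1 else t) := by
  rw [prime_eq i h2]
  cases isPrimeB i
  · simp
  · rw [if_neg (by simp), contribution_A i h2 hb]
    cases PySem.List.pyGetD happyTbl (sqSumB i) false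
    · simp
    · simp

-- ===== VERDICT (by name: the statement is the Claim_ definition above) =====
theorem solve_spec : Claim_equal_solve := by
  intro a b hdom
  unfold Spec_solve solve solve_alt
  apply PySem.List.foldl_congr_mem
  intro t i hi
  rw [PySem.List.mem_pyRange_one] at hi
  have hdb : b ≤ 2 ^ 31 := by
    simp only [Dom_solve, pvDomInt, Bool.and_eq_true, decide_eq_true_eq] at hdom
    omega
  exact per_elem i (le_trans (le_max_left 2 a) hi.1) (by omega) t
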